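-- pv_equiv track=rewrite | github.com/aidenyatko/Python | lesson_006/mastermind_engine.py | number_in_numlist
-- ===== SOURCE A (Python) =====
-- def number_in_numlist(number):
--     numlist = []
--     x = 1000
--     for _ in range(0, 4):
--         num_i = ((number // (x * 10)) * 10) - (number // x)
--         x = x // 10
--         if num_i < 0:
--             num_i = num_i * (-1)
--         numlist.append(num_i)
--     return numlist
-- ===== SOURCE B (Python) =====
-- def number_in_numlist(number):
--     digits = []
--     n = number
--     for _ in range(4):
--         digits.append(n % 10)
--         n //= 10
--     return list(reversed(digits))
-- ===== Notes on version B (the rewrite author's own statement) =====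
-- stated objective: simpler
-- what changed: Replaces A's per-position formula (quotient by each descending power of ten, scaled, subtracted and made non-negative) with a running least-significant-first quotient loop (append the remainder, floor-divide by ten) followed by a reversal.
import Mathlib
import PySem

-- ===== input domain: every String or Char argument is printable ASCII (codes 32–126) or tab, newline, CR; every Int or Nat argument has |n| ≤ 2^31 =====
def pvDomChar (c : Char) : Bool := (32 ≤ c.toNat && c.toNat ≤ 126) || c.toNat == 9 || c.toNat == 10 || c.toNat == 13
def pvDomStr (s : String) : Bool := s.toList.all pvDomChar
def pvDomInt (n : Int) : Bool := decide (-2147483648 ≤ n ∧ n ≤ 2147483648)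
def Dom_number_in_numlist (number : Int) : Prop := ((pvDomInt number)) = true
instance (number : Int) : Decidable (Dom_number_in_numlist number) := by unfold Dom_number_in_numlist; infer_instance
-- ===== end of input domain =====

-- B extracts the digits least-significant-first with a running quotient (mod/floordiv by ten)
-- and reverses, instead of A's per-position formula with abs; objective: simpler.

-- ===== PORT A =====
def number_in_numlist (number : Int) : List Int :=
  (((PySem.List.pyRange 0 4 1).foldl
    (fun (s : List Int × Int) (_ : Int) =>
      let numlist := s.1
      let x := s.2
      let num_i := (PySem.Int.floordiv number (x * 10)) * 10 - PySem.Int.floordiv number x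
      let x := PySem.Int.floordiv x 10
      let num_i := if num_i < 0 then num_i * (-1) else num_i
      (numlist ++ [num_i], x))
    ([], 1000))).1

-- ===== PORT B =====
def number_in_numlist_alt (number : Int) : List Int :=
  (((PySem.List.pyRange 0 4 1).foldl
    (fun (s : List Int × Int) (_ : Int) =>
      let digits := s.1
      let n := s.2
      (digits ++ [PySem.Int.mod n 10], PySem.Int.floordiv n 10))
    ([], number))).1.reverse

-- ===== PRECONDITION & SPEC =====
def Spec_number_in_numlist (number : Int) (out : List Int) : Prop := out = number_in_numlist_alt number
instance (number : Int) (out : List Int) : Decidable (Spec_number_in_numlist number out) := by unfold Spec_number_in_numlist; infer_instance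

-- ===== CLAIM (what is proved, stated in full; the proofs are below) =====
def Claim_equal_number_in_numlist : Prop := ∀ (number : Int), Dom_number_in_numlist number → Spec_number_in_numlist number (number_in_numlist number)

-- ===== LEMMAS AND PROOFS =====

-- A's step at divisor x (0 < x) computes the digit (n // x) % 10.
theorem pv_stepA (n x : Int) (hx : 0 < x) :
    (if (PySem.Int.floordiv n (x * 10)) * 10 - PySem.Int.floordiv n x < 0
     then ((PySem.Int.floordiv n (x * 10)) * 10 - PySem.Int.floordiv n x) * (-1)
     else (PySem.Int.floordiv n (x * 10)) * 10 - PySem.Int.floordiv n x)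
    = PySem.Int.mod (PySem.Int.floordiv n x) 10 := by
  rw [PySem.Int.floordiv_eq_ediv_of_pos (show (0:Int) < x * 10 by positivity),
      PySem.Int.floordiv_eq_ediv_of_pos hx,
      PySem.Int.mod_eq_emod_of_pos (show (0:Int) < 10 by norm_num),
      ← Int.ediv_ediv_of_nonneg (le_of_lt hx)]
  generalize n / x = q
  omega

-- Iterated floor-division by 10 equals floor-division by the power.
theorem pv_fdiv_fdiv (n a : Int) (ha : 0 < a) :
    PySem.Int.floordiv (PySem.Int.floordiv n a) 10 = PySem.Int.floordiv n (a * 10) := by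
  rw [PySem.Int.floordiv_eq_ediv_of_pos ha,
      PySem.Int.floordiv_eq_ediv_of_pos (show (0:Int) < 10 by norm_num),
      PySem.Int.floordiv_eq_ediv_of_pos (show (0:Int) < a * 10 by positivity),
      Int.ediv_ediv_of_nonneg (le_of_lt ha)]

-- ===== VERDICT (by name: the statement is the Claim_ definition above) =====
theorem number_in_numlist_spec : Claim_equal_number_in_numlist := by
  intro number _
  unfold Spec_number_in_numlist number_in_numlist number_in_numlist_alt
  have hr : PySem.List.pyRange 0 4 1 = [0, 1, 2, 3] := by decide
  rw [hr]
  simp only [List.foldl, List.reverse, List.reverseAux, List.nil_append, List.cons_append]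
  rw [(by decide : PySem.Int.floordiv 1000 10 = (100:Int)),
      (by decide : PySem.Int.floordiv 100 10 = (10:Int)),
      (by decide : PySem.Int.floordiv 10 10 = (1:Int))]
  rw [pv_stepA number 1000 (by norm_num), pv_stepA number 100 (by norm_num),
      pv_stepA number 10 (by norm_num), pv_stepA number 1 (by norm_num)]
  have h2 : PySem.Int.floordiv (PySem.Int.floordiv number 10) 10 = PySem.Int.floordiv number 100 := by
    rw [pv_fdiv_fdiv number 10 (by norm_num)]; norm_num
  have h3 : PySem.Int.floordiv (PySem.Int.floordiv (PySem.Int.floordiv number 10) 10) 10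
      = PySem.Int.floordiv number 1000 := by
    rw [h2, pv_fdiv_fdiv number 100 (by norm_num)]; norm_num
  have h1 : PySem.Int.floordiv number 1 = number := by
    rw [PySem.Int.floordiv_eq_ediv_of_pos (show (0:Int) < 1 by norm_num), Int.ediv_one]
  rw [h3, h2, h1]
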